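-- pv_equiv track=rewrite | github.com/ramscarv/codigos_python_imperativo | função menor nome em ordem alfabetica.py | nomes
-- ===== SOURCE A (Python) =====
-- def nomes(nomealfa):
--     min=nomealfa[0]
--     i=1
--     while i < len(nomealfa):
--         if nomealfa[i] < min:
--             min=nomealfa[i]
--         i=i+1
--     return min.strip().capitalize()
-- ===== SOURCE B (Python) =====
-- def nomes(nomealfa):
--     return sorted(nomealfa)[0].strip().capitalize()
-- ===== Notes on version B (the rewrite author's own statement) =====
-- stated objective: simpler
-- what changed: Replaces the manual running-minimum while-loop with one stable sort and taking the first element (sorted(...)[0]); the formatting step is unchanged.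
import Mathlib
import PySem

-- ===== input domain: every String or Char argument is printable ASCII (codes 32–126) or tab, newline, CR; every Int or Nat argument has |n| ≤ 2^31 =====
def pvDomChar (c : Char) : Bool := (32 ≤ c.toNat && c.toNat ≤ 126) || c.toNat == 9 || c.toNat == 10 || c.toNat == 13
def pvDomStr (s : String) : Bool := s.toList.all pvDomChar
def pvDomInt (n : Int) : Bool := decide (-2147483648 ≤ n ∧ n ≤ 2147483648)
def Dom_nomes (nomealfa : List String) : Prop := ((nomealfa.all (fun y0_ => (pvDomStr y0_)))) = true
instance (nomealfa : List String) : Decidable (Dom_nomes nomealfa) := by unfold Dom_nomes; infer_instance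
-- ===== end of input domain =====

-- B replaces A's manual running-minimum while-loop with sorted(...)[0]; same formatting step (objective: simpler).

-- ===== PORT A =====
-- shared helper: .strip().capitalize() (str.capitalize on ASCII: first char uppercased, rest lowercased)
def pyStripCapitalize (s : String) : String :=
  match (PySem.Str.strip s).toList with
  | [] => ""
  | c :: rest => String.mk (PySem.Chars.upperChar c :: PySem.Chars.lower rest)

-- min = nomealfa[0]; while i < len: if nomealfa[i] < min: min = nomealfa[i]
def nomes (nomealfa : List String) : String :=
  pyStripCapitalize
    ((nomealfa.drop 1).foldl (fun m x => if x < m then x else m) (nomealfa.headD ""))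

-- ===== PORT B =====
-- return sorted(nomealfa)[0].strip().capitalize()
def nomes_alt (nomealfa : List String) : String :=
  pyStripCapitalize ((PySem.List.sorted nomealfa (fun x => x) false).headD "")

-- ===== PRECONDITION & SPEC =====
-- Pre_ excludes only the empty list, on which both Pythons raise IndexError.
def Pre_nomes (nomealfa : List String) : Prop := nomealfa ≠ []
instance (nomealfa : List String) : Decidable (Pre_nomes nomealfa) := by unfold Pre_nomes; infer_instance
def pvWitness_nomes : List String := ["  beto ", "Ana", "ana"]

def Spec_nomes (nomealfa : List String) (out : String) : Prop := out = nomes_alt nomealfa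
instance (nomealfa : List String) (out : String) : Decidable (Spec_nomes nomealfa out) := by unfold Spec_nomes; infer_instance

-- ===== CLAIM (what is proved, stated in full; the proofs are below) =====
def Claim_equal_nomes : Prop := ∀ (nomealfa : List String), Dom_nomes nomealfa → Pre_nomes nomealfa → Spec_nomes nomealfa (nomes nomealfa)

-- ===== LEMMAS AND PROOFS =====

-- A's strict-< first-minimum fold is the foldl of Lean's `min` (which also keeps the first of ties).
theorem foldl_strictMin_eq_foldl_min (t : List String) (x : String) :
    t.foldl (fun m y => if y < m then y else m) x = t.foldl min x := by
  induction t generalizing x with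
  | nil => rfl
  | cons y ys ih =>
      simp only [List.foldl]
      have : (if y < x then y else x) = min x y := by
        rcases lt_or_ge y x with h | h
        · simp [h, min_def, not_le.mpr h] -- keep-first tie rule
        · simp [not_lt.mpr h, min_def, h]
      rw [this, ih]

-- inserting y into a nonempty accumulator replaces its head by min h y
theorem head_insertBy (y h : String) (t : List String) :
    ∃ t', PySem.List.insertBy (fun a b => decide (a < b)) y (h :: t) = min h y :: t' := by
  by_cases hy : y < h
  · exact ⟨h :: t, by simp [PySem.List.insertBy, hy, min_def, not_le.mpr hy]⟩
  · exact ⟨PySem.List.insertBy (fun a b => decide (a < b)) y t,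
      by simp [PySem.List.insertBy, hy, min_def, not_lt.mp hy]⟩

-- invariant: the head of the insertion-sort accumulator is the running minimum
theorem head_foldl_insertBy (xs : List String) (h : String) (t : List String) :
    (xs.foldl (fun acc x => PySem.List.insertBy (fun a b => decide (a < b)) x acc) (h :: t)).head?
      = some (xs.foldl min h) := by
  induction xs generalizing h t with
  | nil => rfl
  | cons y ys ih =>
      simp only [List.foldl]
      obtain ⟨t', ht'⟩ := head_insertBy y h t
      rw [ht', ih]

-- the first element of Python's stable sorted(xs) is the running minimum of the loop
theorem head_sorted (x : String) (xs : List String) :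
    (PySem.List.sorted (x :: xs) (fun y => y) false).headD "" = xs.foldl min x := by
  rw [PySem.List.sorted_eq_foldl_insertBy]
  have : List.foldl (fun acc y => PySem.List.insertBy (fun a b => decide (a < b)) y acc)
      ([] : List String) (x :: xs)
      = List.foldl (fun acc y => PySem.List.insertBy (fun a b => decide (a < b)) y acc)
        (x :: ([] : List String)) xs := by
    simp [PySem.List.insertBy]
  rw [this, List.headD_eq_head?_getD, head_foldl_insertBy]
  rfl

-- ===== VERDICT (by name: the statement is the Claim_ definition above) =====
theorem nomes_spec : Claim_equal_nomes := by
  intro nomealfa _ hpre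
  unfold Spec_nomes nomes nomes_alt
  cases nomealfa with
  | nil => exact absurd rfl hpre
  | cons x xs =>
      simp only [List.drop_one, List.tail_cons, List.headD_cons]
      rw [head_sorted, foldl_strictMin_eq_foldl_min]
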